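-- pv_equiv track=rewrite | github.com/easel/helix | scripts/refresh_context_digests.py | concern_matches
-- ===== SOURCE A (Python) =====
-- def concern_matches(bead_areas: set[str], concern_areas: list[str]) -> bool:
--     if "all" in concern_areas:
--         return True
--     aliases = {
--         "ui": {"ui", "frontend", "site"},
--         "frontend": {"ui", "frontend", "site"},
--         "api": {"api", "backend"},
--         "backend": {"api", "backend"},
--         "site": {"site"},
--     }
--     expanded = set(bead_areas)
--     for area in list(bead_areas):
--         expanded |= aliases.get(area, set())
--     for concern_area in concern_areas:
--         if concern_area in expanded:
--             return True
--         if aliases.get(concern_area, set()) & bead_areas: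
--             return True
--     return False
-- ===== SOURCE B (Python) =====
-- def concern_matches(bead_areas: set[str], concern_areas: list[str]) -> bool:
--     if "all" in concern_areas:
--         return True
--     aliases = {
--         "ui": {"ui", "frontend", "site"},
--         "frontend": {"ui", "frontend", "site"},
--         "api": {"api", "backend"},
--         "backend": {"api", "backend"},
--         "site": {"site"},
--     }
--     return any(
--         bead == concern
--         or concern in aliases.get(bead, set())
--         or bead in aliases.get(concern, set())
--         for concern in concern_areas
--         for bead in bead_areas
--     )
-- ===== Notes on version B (the rewrite author's own statement) =====
-- stated objective: simpler
-- what changed: Replaces the precomputed expanded alias set plus two per-concern membership/intersection checks with a single direct pairwise any() over (concern, bead) pairs testing a symmetric match predicate.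
import Mathlib
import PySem

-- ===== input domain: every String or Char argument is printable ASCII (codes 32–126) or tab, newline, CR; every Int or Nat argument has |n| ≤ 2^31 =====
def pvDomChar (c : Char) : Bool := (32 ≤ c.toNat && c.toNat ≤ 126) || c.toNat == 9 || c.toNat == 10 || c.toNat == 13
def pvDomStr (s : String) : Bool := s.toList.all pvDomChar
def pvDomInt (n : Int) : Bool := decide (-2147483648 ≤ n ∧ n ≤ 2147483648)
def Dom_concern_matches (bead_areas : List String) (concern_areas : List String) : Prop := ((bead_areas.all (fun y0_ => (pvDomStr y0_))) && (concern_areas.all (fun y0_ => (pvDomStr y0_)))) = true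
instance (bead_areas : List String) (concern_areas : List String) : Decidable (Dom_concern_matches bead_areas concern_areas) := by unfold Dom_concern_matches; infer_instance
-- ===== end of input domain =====

-- B replaces A's precomputed expanded alias set with a direct nested pairwise scan
-- of a symmetric match predicate; objective: simpler.
-- ===== PORT A =====
-- the aliases dict (shared literal of both sources)
def pvAliases : PySem.Dict String (PySem.Set String) :=
  PySem.Dict.ofList [("ui", PySem.Set.ofList ["ui", "frontend", "site"]),
   ("frontend", PySem.Set.ofList ["ui", "frontend", "site"]),
   ("api", PySem.Set.ofList ["api", "backend"]),
   ("backend", PySem.Set.ofList ["api", "backend"]),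
   ("site", PySem.Set.ofList ["site"])]

-- A's second loop: early-return over concern_areas
def pvLoopA (expanded : PySem.Set String) (bead_areas : List String) : List String → Bool
  | [] => false
  | c :: rest =>
    if PySem.Set.contains expanded c then true
    else if PySem.Set.inter (pvAliases.getD c PySem.Set.empty) bead_areas ≠ [] then true
    else pvLoopA expanded bead_areas rest

def concern_matches (bead_areas : List String) (concern_areas : List String) : Bool :=
  if concern_areas.contains "all" then true
  else
    let expanded := bead_areas.foldl
      (fun acc area => PySem.Set.union acc (pvAliases.getD area PySem.Set.empty))
      (PySem.Set.ofList bead_areas)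
    pvLoopA expanded bead_areas concern_areas

-- ===== PORT B =====
def concern_matches_alt (bead_areas : List String) (concern_areas : List String) : Bool :=
  if concern_areas.contains "all" then true
  else concern_areas.any (fun concern => bead_areas.any (fun bead =>
    bead == concern
    || PySem.Set.contains (pvAliases.getD bead PySem.Set.empty) concern
    || PySem.Set.contains (pvAliases.getD concern PySem.Set.empty) bead))

-- ===== PRECONDITION & SPEC =====
def Spec_concern_matches (bead_areas : List String) (concern_areas : List String) (out : Bool) : Prop := out = concern_matches_alt bead_areas concern_areas
instance (bead_areas : List String) (concern_areas : List String) (out : Bool) : Decidable (Spec_concern_matches bead_areas concern_areas out) := by unfold Spec_concern_matches; infer_instance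

-- ===== CLAIM (what is proved, stated in full; the proofs are below) =====
def Claim_equal_concern_matches : Prop := ∀ (bead_areas : List String) (concern_areas : List String), Dom_concern_matches bead_areas concern_areas → Spec_concern_matches bead_areas concern_areas (concern_matches bead_areas concern_areas)

-- ===== LEMMAS AND PROOFS =====

-- ===== VERDICT (by name: the statement is the Claim_ definition above) =====
-- membership in the folded union building `expanded`
lemma mem_foldl_union (l : List String) (acc : PySem.Set String) (x : String) :
    x ∈ l.foldl (fun a area => PySem.Set.union a (pvAliases.getD area PySem.Set.empty)) acc ↔
      x ∈ acc ∨ ∃ b ∈ l, x ∈ pvAliases.getD b PySem.Set.empty := by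
  induction l generalizing acc with
  | nil => simp
  | cons h t ih =>
    simp only [List.foldl_cons, ih, PySem.Set.mem_union, List.mem_cons]
    constructor
    · rintro (⟨hx | hx⟩ | ⟨b, hb, hx⟩)
      · exact Or.inl hx
      · exact Or.inr ⟨h, Or.inl rfl, hx⟩
      · exact Or.inr ⟨b, Or.inr hb, hx⟩
    · rintro (hx | ⟨b, hb | hb, hx⟩)
      · exact Or.inl (Or.inl hx)
      · exact Or.inl (Or.inr (hb ▸ hx))
      · exact Or.inr ⟨b, hb, hx⟩

-- A's early-return loop is an `any`
lemma pvLoopA_eq_any (expanded : PySem.Set String) (bead_areas : List String)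
    (cs : List String) :
    pvLoopA expanded bead_areas cs =
      cs.any (fun c => PySem.Set.contains expanded c
        || decide (PySem.Set.inter (pvAliases.getD c PySem.Set.empty) bead_areas ≠ [])) := by
  induction cs with
  | nil => rfl
  | cons c rest ih =>
    rw [List.any_cons, ← ih]
    simp [pvLoopA, Bool.or_assoc]

theorem concern_matches_spec : Claim_equal_concern_matches := by
  intro bead_areas concern_areas _
  unfold Spec_concern_matches concern_matches concern_matches_alt
  by_cases hall : concern_areas.contains "all" = true
  · rw [if_pos hall, if_pos hall]
  · rw [if_neg hall, if_neg hall, pvLoopA_eq_any]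
    congr 1
    funext c
    apply Bool.eq_iff_iff.mpr
    simp only [Bool.or_eq_true, decide_eq_true_eq, List.any_eq_true,
      beq_iff_eq, PySem.Set.contains_iff, mem_foldl_union, PySem.Set.mem_ofList]
    constructor
    · rintro (⟨hc | ⟨b, hb, hc⟩⟩ | hne)
      · exact ⟨c, hc, Or.inl (Or.inl rfl)⟩
      · exact ⟨b, hb, Or.inl (Or.inr hc)⟩
      · obtain ⟨b, hb⟩ := List.exists_mem_of_ne_nil _ hne
        rw [PySem.Set.mem_inter] at hb
        exact ⟨b, hb.2, Or.inr hb.1⟩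
    · rintro ⟨b, hb, (rfl | hc) | hc⟩
      · exact Or.inl (Or.inl hb)
      · exact Or.inl (Or.inr ⟨b, hb, hc⟩)
      · refine Or.inr (List.ne_nil_of_mem (a := b) ?_)
        rw [PySem.Set.mem_inter]
        exact ⟨hc, hb⟩
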